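-- pv_equiv track=rewrite | github.com/ibrahim-nazari/practice-algorithm | dp/recommendation.py | recommend_items
-- ===== SOURCE A (Python) =====
-- from collections import defaultdict
--
-- def recommend_items(user_histories):
--     # Step 2: Build a frequency map
--     frequency_map = defaultdict(lambda: defaultdict(int))
--
--     for history in user_histories:
--         items = history.split('>')
--
--         for i in range(len(items) - 1):
--             current_item = items[i].lower()  # case insensitive
--             next_item = items[i + 1].lower()
--             frequency_map[current_item][next_item] += 1
--
--
--     # Step 3: Sort and format output
--     result = []
--     for item in sorted(frequency_map.keys()):
--         recommendations = frequency_map[item]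
--         # Sort by frequency (desc) then by item (asc)
--         sorted_recommendations = sorted(recommendations.items(), key=lambda x: (-x[1], list(recommendations.keys()).index(x[0])))
--
--         recommended_items = [rec[0] for rec in sorted_recommendations]
--         result.append(f"{item}:{','.join(recommended_items)}")
--
--     return result
-- ===== SOURCE B (Python) =====
-- from collections import Counter
--
--
-- def recommend_items(user_histories):
--     # One flat list of lowercased (current, next) transitions across all histories.
--     transitions = []
--     for history in user_histories:
--         items = [part.lower() for part in history.split('>')]
--         transitions.extend(zip(items, items[1:]))
--
--     result = []
--     for source in sorted(set(cur for cur, _ in transitions)):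
--         nexts = [nxt for cur, nxt in transitions if cur == source]
--         counts = Counter(nexts)
--         # Stable sort by descending count keeps first-appearance order on ties.
--         ordered = sorted(counts.items(), key=lambda kv: -kv[1])
--         result.append(f"{source}:{','.join(k for k, _ in ordered)}")
--     return result
-- ===== Notes on version B (the rewrite author's own statement) =====
-- stated objective: alternative
-- what changed: Replaces A's nested defaultdict with a single flat list of lowercased (current,next) transitions, a per-source filter + Counter, and a plain stable sort by descending count instead of A's quadratic index-based tie-break key.
import Mathlib
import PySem

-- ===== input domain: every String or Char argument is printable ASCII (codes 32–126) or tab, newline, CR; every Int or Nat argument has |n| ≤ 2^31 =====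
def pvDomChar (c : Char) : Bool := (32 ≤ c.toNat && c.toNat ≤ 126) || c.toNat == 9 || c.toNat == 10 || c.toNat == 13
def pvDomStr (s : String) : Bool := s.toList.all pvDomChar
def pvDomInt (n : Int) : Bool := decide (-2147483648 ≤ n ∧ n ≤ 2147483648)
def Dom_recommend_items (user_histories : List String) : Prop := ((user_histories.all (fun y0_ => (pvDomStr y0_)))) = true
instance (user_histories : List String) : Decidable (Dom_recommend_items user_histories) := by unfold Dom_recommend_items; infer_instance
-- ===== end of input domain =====

-- ===== PORT A =====
-- B changes the data structure: one flat transition list + per-source Counter instead of A's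
-- nested defaultdict with an index-based tie-break key (objective: alternative).
def recommend_items (user_histories : List String) : List String :=
  let fm : PySem.Dict String (PySem.Dict String Int) :=
    user_histories.foldl (fun fm history =>
      -- items = history.split('>'); sep is the non-empty literal ">", so split? is always some
      let items := (PySem.Str.split? history ">").getD []
      -- for i in range(len(items) - 1): indices i, i+1 are always in range here
      (PySem.List.pyRange 0 ((items.length : Int) - 1)).foldl (fun fm i =>
        let current_item := PySem.Str.lower (PySem.List.pyGetD items i "")
        let next_item := PySem.Str.lower (PySem.List.pyGetD items (i + 1) "")
        fm.modify current_item PySem.Dict.empty (fun inner => inner.modify next_item 0 (· + 1))) fm)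
      PySem.Dict.empty
  (PySem.List.sorted fm.keys (fun x => x) false).foldl (fun result item =>
    -- defaultdict lookup frequency_map[item]; item is a key, so the default is never used
    let recommendations := fm.getD item PySem.Dict.empty
    let sorted_recommendations := PySem.List.sorted2 recommendations.items
      (fun x => -x.2) (fun x => ((PySem.List.index? recommendations.keys x.1).getD 0 : Nat))
    let recommended_items := sorted_recommendations.map (fun rec => rec.1)
    result ++ [item ++ ":" ++ PySem.Str.join "," recommended_items]) []

-- ===== PORT B =====
def recommend_items_alt (user_histories : List String) : List String :=
  let transitions : List (String × String) :=
    user_histories.foldl (fun ts history =>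
      -- sep is the non-empty literal ">", so split? is always some
      let items := ((PySem.Str.split? history ">").getD []).map PySem.Str.lower
      ts ++ items.zip (items.drop 1)) []
  let sources := PySem.List.sorted (PySem.Set.ofList (transitions.map (fun p => p.1))) (fun x => x) false
  sources.map (fun source =>
    let nexts := (transitions.filter (fun p => p.1 == source)).map (fun p => p.2)
    let ordered := PySem.List.sorted (PySem.Dict.counter nexts).items (fun kv => -kv.2) false
    source ++ ":" ++ PySem.Str.join "," (ordered.map (fun kv => kv.1)))

-- ===== PRECONDITION & SPEC =====
def Spec_recommend_items (user_histories : List String) (out : List String) : Prop := out = recommend_items_alt user_histories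
instance (user_histories : List String) (out : List String) : Decidable (Spec_recommend_items user_histories out) := by unfold Spec_recommend_items; infer_instance

-- ===== CLAIM (what is proved, stated in full; the proofs are below) =====
def Claim_equal_recommend_items : Prop := ∀ (user_histories : List String), Dom_recommend_items user_histories → Spec_recommend_items user_histories (recommend_items user_histories)


-- ===== LEMMAS AND PROOFS =====

def pvStep (fm : PySem.Dict String (PySem.Dict String Int)) (p : String × String) :
    PySem.Dict String (PySem.Dict String Int) :=
  fm.modify p.1 PySem.Dict.empty (fun inner => inner.modify p.2 0 (· + 1))

theorem pv_zip_drop_eq_map_range {α : Type} (l : List α) (d : α) :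
    l.zip (l.drop 1) = (List.range (l.length - 1)).map (fun k => (l.getD k d, l.getD (k + 1) d)) := by
  apply List.ext_getElem
  · simp [List.length_zip]
  · intro i h1 h2
    simp only [List.length_zip, List.length_drop] at h1
    have h3 : i < l.length := by omega
    have h4 : i + 1 < l.length := by omega
    simp [List.getElem_zip, List.getD, h3, h4]

theorem pv_inner (items : List String) (fm : PySem.Dict String (PySem.Dict String Int)) :
    (PySem.List.pyRange 0 ((items.length : Int) - 1)).foldl (fun fm i =>
        pvStep fm (PySem.Str.lower (PySem.List.pyGetD items i ""),
                   PySem.Str.lower (PySem.List.pyGetD items (i + 1) ""))) fm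
      = ((items.map PySem.Str.lower).zip ((items.map PySem.Str.lower).drop 1)).foldl pvStep fm := by
  cases items with
  | nil =>
      have h0 : PySem.List.pyRange 0 (((List.nil : List String).length : Int) - 1) = [] := by decide
      rw [h0]; rfl
  | cons a t =>
      have hlen : (((a :: t).length : Int) - 1) = ((t.length : Nat) : Int) := by simp only [List.length_cons]; push_cast; omega
      rw [hlen, PySem.List.pyRange_zero_natCast, List.foldl_map]
      rw [show ((a :: t).map PySem.Str.lower).zip (((a :: t).map PySem.Str.lower).drop 1)
            = (((a :: t).zip ((a :: t).drop 1)).map (Prod.map PySem.Str.lower PySem.Str.lower)) by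
          rw [← List.map_drop, List.zip_map]]
      rw [List.foldl_map, pv_zip_drop_eq_map_range ((a : String) :: t) "", List.foldl_map]
      apply PySem.List.foldl_congr_mem
      intro acc k hk
      have : ((k : Int) + 1) = ((k + 1 : Nat) : Int) := by push_cast; ring
      rw [this, PySem.List.pyGetD_natCast, PySem.List.pyGetD_natCast]
      rfl

def pvTrans (h : String) : List (String × String) :=
  let items := ((PySem.Str.split? h ">").getD []).map PySem.Str.lower
  items.zip (items.drop 1)

theorem pv_outer (hs : List String) (fm : PySem.Dict String (PySem.Dict String Int)) :
    hs.foldl (fun fm history =>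
      let items := (PySem.Str.split? history ">").getD []
      (PySem.List.pyRange 0 ((items.length : Int) - 1)).foldl (fun fm i =>
        pvStep fm (PySem.Str.lower (PySem.List.pyGetD items i ""),
                   PySem.Str.lower (PySem.List.pyGetD items (i + 1) ""))) fm) fm
      = (hs.flatMap pvTrans).foldl pvStep fm := by
  induction hs generalizing fm with
  | nil => rfl
  | cons h t ih =>
      rw [List.foldl_cons, List.flatMap_cons, List.foldl_append, ih]
      congr 1
      rw [pv_inner]
      rfl

theorem pv_keys (ts : List (String × String)) :
    (ts.foldl pvStep PySem.Dict.empty).keys = PySem.Set.ofList (ts.map (fun p => p.1)) := by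
  unfold pvStep
  rw [PySem.Dict.keys_foldl_modify_key ts (fun p => p.1) PySem.Dict.empty
        (fun _ p inner => inner.modify p.2 0 (· + 1)) PySem.Dict.empty]
  rw [PySem.Dict.keys_empty]
  rfl

theorem pv_getD (ts : List (String × String)) (fm : PySem.Dict String (PySem.Dict String Int))
    (s : String) :
    (ts.foldl pvStep fm).getD s PySem.Dict.empty
      = ((ts.filter (fun p => p.1 == s)).map (fun p => p.2)).foldl
          (fun inner t => inner.modify t 0 (· + 1)) (fm.getD s PySem.Dict.empty) := by
  induction ts generalizing fm with
  | nil => rfl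
  | cons p t ih =>
      rw [List.foldl_cons, ih]
      by_cases h : p.1 = s
      · simp [pvStep, h]
      · simp [pvStep, h, Ne.symm h, PySem.Dict.getD_modify]

theorem pv_counter (ts : List (String × String)) (s : String) :
    (ts.foldl pvStep PySem.Dict.empty).getD s PySem.Dict.empty
      = PySem.Dict.counter ((ts.filter (fun p => p.1 == s)).map (fun p => p.2)) := by
  rw [pv_getD, PySem.Dict.getD_empty, PySem.Dict.counter_eq_foldl]

theorem pv_insertBy_congr {α : Type} (b1 b2 : α → α → Bool) (x : α) (ys : List α)
    (h : ∀ y ∈ ys, b1 x y = b2 x y) :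
    PySem.List.insertBy b1 x ys = PySem.List.insertBy b2 x ys := by
  induction ys with
  | nil => rfl
  | cons y ys ih =>
      rw [PySem.List.insertBy.eq_2, PySem.List.insertBy.eq_2, h y (by simp)]
      by_cases hb : b2 x y = true
      · simp [hb]
      · simp [hb, ih (fun z hz => h z (by simp [hz]))]

theorem pv_foldl_insertBy_congr {α : Type} (k : α → Int) (p : α → Nat) (l acc : List α)
    (hp : l.Pairwise (fun a b => p a < p b))
    (hacc : ∀ x ∈ l, ∀ y ∈ acc, p y < p x) :
    l.foldl (fun acc x => PySem.List.insertBy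
        (fun a b => decide (k a < k b) || !decide (k b < k a) && decide (p a < p b)) x acc) acc
      = l.foldl (fun acc x => PySem.List.insertBy (fun a b => decide (k a < k b)) x acc) acc := by
  induction l generalizing acc with
  | nil => rfl
  | cons x l ih =>
      rw [List.foldl_cons, List.foldl_cons]
      have hins : PySem.List.insertBy
          (fun a b => decide (k a < k b) || !decide (k b < k a) && decide (p a < p b)) x acc
            = PySem.List.insertBy (fun a b => decide (k a < k b)) x acc := by
        apply pv_insertBy_congr
        intro y hy
        have : ¬ (p x < p y) := by
          have := hacc x (by simp) y hy
          omega
        simp [this]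
      rw [hins]
      refine ih _ hp.tail ?_
      intro z hz y hy
      rw [PySem.List.insertBy_mem_iff] at hy
      rcases hy with rfl | hy
      · exact (List.pairwise_cons.mp hp).1 z hz
      · exact lt_trans (hacc x (by simp) y hy) ((List.pairwise_cons.mp hp).1 z hz)

theorem pv_sorted2_eq_sorted {α : Type} (l : List α) (k : α → Int) (p : α → Nat)
    (hp : l.Pairwise (fun a b => p a < p b)) :
    PySem.List.sorted2 l k p false = PySem.List.sorted l k false := by
  rw [PySem.List.sorted2.eq_def, PySem.List.sorted_eq_foldl_insertBy]
  simp only [Bool.false_eq_true, if_false]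
  exact pv_foldl_insertBy_congr k p l [] hp (by simp)

theorem pv_index?_getElem (S : List String) (hS : S.Nodup) (i : Nat) (h : i < S.length) :
    PySem.List.index? S S[i] = some i := by
  rw [PySem.List.index?_eq_idxOf?, List.idxOf?_eq_some_iff]
  refine ⟨h, rfl, ?_⟩
  intro j hj heq
  have := (List.Nodup.getElem_inj_iff hS).mp heq
  omega

theorem pv_sortkey (xs : List String) :
    PySem.List.sorted2 (PySem.Dict.counter xs).items (fun x => -x.2)
        (fun x => ((PySem.List.index? (PySem.Dict.counter xs).keys x.1).getD 0 : Nat)) false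
      = PySem.List.sorted (PySem.Dict.counter xs).items (fun kv => -kv.2) false := by
  apply pv_sorted2_eq_sorted
  rw [PySem.Dict.items_counter, PySem.Dict.keys_counter]
  rw [List.pairwise_iff_getElem]
  intro i j hi hj hij
  simp only [List.length_map] at hi hj
  simp only [List.getElem_map]
  rw [pv_index?_getElem _ (PySem.Set.nodup_ofList xs) i hi,
      pv_index?_getElem _ (PySem.Set.nodup_ofList xs) j hj]
  simpa using hij

theorem pv_reduced (hs : List String) :
    (PySem.List.sorted
        ((hs.foldl (fun fm history =>
            let items := (PySem.Str.split? history ">").getD []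
            (PySem.List.pyRange 0 ((items.length : Int) - 1)).foldl (fun fm i =>
              pvStep fm (PySem.Str.lower (PySem.List.pyGetD items i ""),
                         PySem.Str.lower (PySem.List.pyGetD items (i + 1) ""))) fm)
          PySem.Dict.empty).keys) (fun x => x) false).foldl (fun result item =>
      result ++ [item ++ ":" ++ PySem.Str.join ","
        ((PySem.List.sorted2
            ((hs.foldl (fun fm history =>
                let items := (PySem.Str.split? history ">").getD []
                (PySem.List.pyRange 0 ((items.length : Int) - 1)).foldl (fun fm i =>
                  pvStep fm (PySem.Str.lower (PySem.List.pyGetD items i ""),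
                             PySem.Str.lower (PySem.List.pyGetD items (i + 1) ""))) fm)
              PySem.Dict.empty).getD item PySem.Dict.empty).items
            (fun x => -x.2)
            (fun x => ((PySem.List.index?
                ((hs.foldl (fun fm history =>
                    let items := (PySem.Str.split? history ">").getD []
                    (PySem.List.pyRange 0 ((items.length : Int) - 1)).foldl (fun fm i =>
                      pvStep fm (PySem.Str.lower (PySem.List.pyGetD items i ""),
                                 PySem.Str.lower (PySem.List.pyGetD items (i + 1) ""))) fm)
                  PySem.Dict.empty).getD item PySem.Dict.empty).keys x.1).getD 0 : Nat))).map
          (fun rec => rec.1))]) []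
    = (PySem.List.sorted (PySem.Set.ofList
          ((hs.foldl (fun ts history =>
              let items := ((PySem.Str.split? history ">").getD []).map PySem.Str.lower
              ts ++ items.zip (items.drop 1)) []).map (fun p => p.1))) (fun x => x) false).map
        (fun source =>
          source ++ ":" ++ PySem.Str.join ","
            ((PySem.List.sorted (PySem.Dict.counter
                (((hs.foldl (fun ts history =>
                    let items := ((PySem.Str.split? history ">").getD []).map PySem.Str.lower
                    ts ++ items.zip (items.drop 1)) []).filter (fun p => p.1 == source)).map
                  (fun p => p.2))).items (fun kv => -kv.2) false).map (fun kv => kv.1))) := by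
  rw [PySem.List.foldl_append_eq_flatMap (fun history =>
        let items := ((PySem.Str.split? history ">").getD []).map PySem.Str.lower
        items.zip (items.drop 1)) hs []]
  rw [pv_outer hs PySem.Dict.empty]
  rw [pv_keys, PySem.List.foldl_append_singleton_eq_map, List.nil_append]
  apply List.map_congr_left
  intro s _
  rw [pv_counter _ s, pv_sortkey]
  rfl


-- ===== VERDICT (by name: the statement is the Claim_ definition above) =====
theorem recommend_items_spec : Claim_equal_recommend_items := by
  intro hs _
  unfold Spec_recommend_items
  exact pv_reduced hs
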